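-- pv_equiv track=rewrite | github.com/MatthewTang/AA | Recursion/solution.py | find_all_sub_sequences_3
-- ===== SOURCE A (Python) =====
-- def find_all_sub_sequences_3(nums, k):
--     res = []
--
--     def dfs(i, ss):
--         ss.append(nums[i])
--         res.append(ss[:])
--         for j in range(i + 1, len(nums)):
--             if 0 < nums[j] - nums[i] <= k:
--                 dfs(j, ss)
--         ss.pop()
--
--         # # w/o append/pop
--         # _ss = ss + [nums[i]]
--         # res.append(_ss)
--         # for j in range(i + 1, len(nums)):
--         #     if nums[j] > nums[i]:
--         #         dfs(j, _ss)
--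
--     for i in range(len(nums)):
--         dfs(i, [])
--
--     return res
-- ===== SOURCE B (Python) =====
-- def find_all_sub_sequences_3(nums, k):
--     # Bottom-up DP: ext[i] = all emitted subsequences starting at index i,
--     # in the same pre-order as the recursive DFS; result is their concatenation.
--     n = len(nums)
--     ext = [None] * n
--     for i in range(n - 1, -1, -1):
--         seqs = [[nums[i]]]
--         for j in range(i + 1, n):
--             if 0 < nums[j] - nums[i] <= k:
--                 seqs.extend([nums[i]] + s for s in ext[j])
--         ext[i] = seqs
--     res = []
--     for s in ext:
--         res.extend(s)
--     return res
-- ===== Notes on version B (the rewrite author's own statement) =====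
-- stated objective: alternative
-- what changed: Replaces the recursive backtracking DFS (shared mutable path + append/pop) with a right-to-left dynamic program that memoizes, for each start index i, the full pre-order list of subsequences starting at i, and concatenates these tables.
import Mathlib
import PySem

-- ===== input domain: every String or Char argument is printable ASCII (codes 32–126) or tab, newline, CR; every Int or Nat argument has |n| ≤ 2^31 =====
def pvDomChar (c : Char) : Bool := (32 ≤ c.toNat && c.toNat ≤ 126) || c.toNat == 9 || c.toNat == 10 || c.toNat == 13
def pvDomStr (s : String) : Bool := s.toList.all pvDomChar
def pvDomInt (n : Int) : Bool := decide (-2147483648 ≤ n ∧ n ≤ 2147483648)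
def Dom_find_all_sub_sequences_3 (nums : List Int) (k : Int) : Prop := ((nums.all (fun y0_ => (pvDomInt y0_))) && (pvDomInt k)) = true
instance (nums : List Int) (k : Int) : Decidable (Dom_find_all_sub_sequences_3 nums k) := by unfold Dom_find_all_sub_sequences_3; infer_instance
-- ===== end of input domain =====

-- B replaces A's recursive backtracking DFS by a right-to-left DP table of per-start
-- subsequence lists (alternative decomposition; return value equivalence only).

-- ===== PORT A =====
-- dfs(i, ss): emissions threaded through `res`; fuel = nums.length bounds the
-- recursion depth (each call strictly increases i), purely to make the port total.
def dfsA (nums : List Int) (k : Int) : Nat → Nat → List Int → List (List Int) → List (List Int)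
  | 0, _, _, res => res
  | fuel + 1, i, ss, res =>
    let xi := PySem.List.pyGetD nums (i : Int) 0
    let ss' := ss ++ [xi]
    let res' := res ++ [ss']
    (PySem.List.pyRange ((i : Int) + 1) (nums.length : Int) 1).foldl
      (fun r j =>
        let xj := PySem.List.pyGetD nums j 0
        if 0 < xj - xi ∧ xj - xi ≤ k then dfsA nums k fuel j.toNat ss' r else r) res'

def find_all_sub_sequences_3 (nums : List Int) (k : Int) : List (List Int) :=
  (PySem.List.pyRange 0 (nums.length : Int) 1).foldl
    (fun res i => dfsA nums k nums.length i.toNat [] res) []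

-- ===== PORT B =====
-- buildExt k l = the table ext of Source B for the suffix l, built right-to-left:
-- entry for x :: rest is seqs = [[x]] extended, for each later (value, table entry)
-- pair with 0 < value - x ≤ k, by that entry's sequences prefixed with x.
def buildExt (k : Int) : List Int → List (List (List Int))
  | [] => []
  | x :: rest =>
    let tr := buildExt k rest
    ((rest.zip tr).foldl
      (fun seqs p =>
        if 0 < p.1 - x ∧ p.1 - x ≤ k then seqs ++ p.2.map (fun s => x :: s) else seqs)
      [[x]]) :: tr

def find_all_sub_sequences_3_alt (nums : List Int) (k : Int) : List (List Int) :=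
  (buildExt k nums).foldl (fun res s => res ++ s) []

-- ===== PRECONDITION & SPEC =====
def Spec_find_all_sub_sequences_3 (nums : List Int) (k : Int) (out : List (List Int)) : Prop := out = find_all_sub_sequences_3_alt nums k
instance (nums : List Int) (k : Int) (out : List (List Int)) : Decidable (Spec_find_all_sub_sequences_3 nums k out) := by unfold Spec_find_all_sub_sequences_3; infer_instance

-- ===== CLAIM (what is proved, stated in full; the proofs are below) =====
def Claim_equal_find_all_sub_sequences_3 : Prop := ∀ (nums : List Int) (k : Int), Dom_find_all_sub_sequences_3 nums k → Spec_find_all_sub_sequences_3 nums k (find_all_sub_sequences_3 nums k)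

-- ===== LEMMAS AND PROOFS =====

theorem length_buildExt (k : Int) (l : List Int) : (buildExt k l).length = l.length := by
  induction l with
  | nil => rfl
  | cons x rest ih => simp [buildExt, ih]

theorem buildExt_drop (k : Int) (l : List Int) (m : Nat) :
    (buildExt k l).drop m = buildExt k (l.drop m) := by
  induction l generalizing m with
  | nil => simp [buildExt]
  | cons x rest ih =>
    cases m with
    | zero => simp
    | succ m => simpa [buildExt] using ih m

-- characterization of the table entry at index i
theorem buildExt_getD (k : Int) (l : List Int) (i : Nat) (h : i < l.length) :
    (buildExt k l).getD i [] =
      ((l.drop (i + 1)).zip (buildExt k (l.drop (i + 1)))).foldl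
        (fun seqs p =>
          if 0 < p.1 - l.getD i 0 ∧ p.1 - l.getD i 0 ≤ k then
            seqs ++ p.2.map (fun s => l.getD i 0 :: s)
          else seqs)
        [[l.getD i 0]] := by
  induction l generalizing i with
  | nil => simp at h
  | cons x rest ih =>
    cases i with
    | zero => simp [buildExt]
    | succ i =>
      simp only [List.length_cons, Nat.succ_lt_succ_iff] at h
      simpa [buildExt] using ih i h

-- pairs (nums[j], ext[j]) for j from a to n-1, as a zip of drops
theorem map_pair_pyRange (nums : List Int) (k : Int) (a : Nat) (ha : a ≤ nums.length) :
    (PySem.List.pyRange (a : Int) (nums.length : Int) 1).map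
        (fun j => (PySem.List.pyGetD nums j 0, (buildExt k nums).getD j.toNat [])) =
      (nums.drop a).zip ((buildExt k nums).drop a) := by
  induction hd : nums.length - a generalizing a with
  | zero =>
    have ha' : a = nums.length := by omega
    subst ha'
    rw [PySem.List.pyRange_one_eq_nil (by omega)]
    simp
  | succ d ih =>
    have hlt : a < nums.length := by omega
    rw [PySem.List.pyRange_one_cons (by exact_mod_cast hlt)]
    have h1 : ((a : Int) + 1) = ((a + 1 : Nat) : Int) := by push_cast; ring
    rw [List.map_cons, h1, ih (a + 1) (by omega) (by omega)]
    have hext : a < (buildExt k nums).length := by rw [length_buildExt]; exact hlt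
    simp only [List.getElem?_eq_getElem, hlt, hext, PySem.List.pyGetD_natCast,
      List.getD_eq_getElem?_getD, Int.toNat_natCast]
    rw [List.drop_eq_getElem_cons hlt, List.drop_eq_getElem_cons hext, List.zip_cons_cons]
    simp

theorem dfsA_eq (nums : List Int) (k : Int) (fuel i : Nat) (ss : List Int)
    (res : List (List Int)) (hi : i < nums.length) (hf : nums.length - i ≤ fuel) :
    dfsA nums k fuel i ss res =
      res ++ ((buildExt k nums).getD i []).map (fun s => ss ++ s) := by
  induction fuel generalizing i ss res with
  | zero => omega
  | succ fuel ih =>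
    simp only [dfsA]
    have hcong :
        ∀ (r : List (List Int)) (j : Int), j ∈ PySem.List.pyRange ((i : Int) + 1) (nums.length : Int) 1 →
          (if 0 < PySem.List.pyGetD nums j 0 - PySem.List.pyGetD nums (i : Int) 0 ∧
              PySem.List.pyGetD nums j 0 - PySem.List.pyGetD nums (i : Int) 0 ≤ k
           then dfsA nums k fuel j.toNat (ss ++ [PySem.List.pyGetD nums (i : Int) 0]) r else r) =
          r ++ (if 0 < PySem.List.pyGetD nums j 0 - PySem.List.pyGetD nums (i : Int) 0 ∧
              PySem.List.pyGetD nums j 0 - PySem.List.pyGetD nums (i : Int) 0 ≤ k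
           then ((buildExt k nums).getD j.toNat []).map
                  (fun s => (ss ++ [PySem.List.pyGetD nums (i : Int) 0]) ++ s)
           else []) := by
      intro r j hj
      rw [PySem.List.mem_pyRange_one] at hj
      have hj1 : i + 1 ≤ j.toNat := by omega
      have hj2 : j.toNat < nums.length := by omega
      split
      · exact ih j.toNat _ r hj2 (by omega)
      · simp
    rw [PySem.List.foldl_congr_mem _ _ _ _ hcong, PySem.List.foldl_append_eq_flatMap]
    rw [buildExt_getD k nums i hi]
    have hzip := map_pair_pyRange nums k (i + 1) (by omega)
    rw [PySem.List.foldl_congr_mem _ _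
      (fun (seqs : List (List Int)) (p : Int × List (List Int)) =>
        seqs ++ (if 0 < p.1 - nums.getD i 0 ∧ p.1 - nums.getD i 0 ≤ k
                 then p.2.map (fun s => nums.getD i 0 :: s) else [])) _
      (by
        intro acc p _
        by_cases hC : 0 < p.1 - nums.getD i 0 ∧ p.1 - nums.getD i 0 ≤ k
        · simp only [if_pos hC]
        · simp only [if_neg hC, List.append_nil])]
    rw [PySem.List.foldl_append_eq_flatMap, ← buildExt_drop, ← hzip]
    push_cast
    simp only [List.map_append, List.flatMap_map, List.map_flatMap,
      PySem.List.pyGetD_natCast]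
    have hfun : ∀ j : Int,
        (if 0 < PySem.List.pyGetD nums j 0 - nums.getD i 0 ∧
            PySem.List.pyGetD nums j 0 - nums.getD i 0 ≤ k then
          List.map (fun s => ss ++ [nums.getD i 0] ++ s) ((buildExt k nums).getD j.toNat [])
        else []) =
        List.map (fun s => ss ++ s)
          (if 0 < PySem.List.pyGetD nums j 0 - nums.getD i 0 ∧
              PySem.List.pyGetD nums j 0 - nums.getD i 0 ≤ k then
            List.map (fun s => nums.getD i 0 :: s) ((buildExt k nums).getD j.toNat [])
          else []) := by
      intro j
      split
      · simp [List.map_map, Function.comp, List.append_assoc]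
      · simp
    simp only [← hfun]
    simp [List.append_assoc]

theorem flatMap_getD_eq_flatten (nums : List Int) (k : Int) :
    (PySem.List.pyRange 0 (nums.length : Int) 1).flatMap
        (fun i => (buildExt k nums).getD i.toNat []) =
      (buildExt k nums).flatten := by
  have hzip := map_pair_pyRange nums k 0 (by omega)
  simp only [Nat.cast_zero, List.drop_zero] at hzip
  have h1 : (PySem.List.pyRange 0 (nums.length : Int) 1).flatMap
      (fun i => (buildExt k nums).getD i.toNat []) =
      ((PySem.List.pyRange 0 (nums.length : Int) 1).map
        (fun j => (PySem.List.pyGetD nums j 0, (buildExt k nums).getD j.toNat []))).flatMap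
        (fun p => p.2) := by
    rw [List.flatMap_map]
  rw [h1, hzip, List.flatMap_def]
  have h2 : (nums.zip (buildExt k nums)).map (fun p => p.2) = buildExt k nums := by
    simpa using List.map_snd_zip (l₁ := nums) (l₂ := buildExt k nums) (by rw [length_buildExt])
  rw [h2]

-- ===== VERDICT (by name: the statement is the Claim_ definition above) =====
theorem find_all_sub_sequences_3_spec : Claim_equal_find_all_sub_sequences_3 := by
  intro nums k _
  unfold Spec_find_all_sub_sequences_3 find_all_sub_sequences_3 find_all_sub_sequences_3_alt
  rw [PySem.List.foldl_congr_mem _ _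
      (fun (res : List (List Int)) (i : Int) =>
        res ++ ((buildExt k nums).getD i.toNat [])) _
      (by
        intro res i hmem
        rw [PySem.List.mem_pyRange_one] at hmem
        have h1 : i.toNat < nums.length := by omega
        rw [dfsA_eq nums k nums.length i.toNat [] res h1 (by omega)]
        simp)]
  rw [PySem.List.foldl_append_eq_flatten, PySem.List.foldl_append_eq_flatMap,
    flatMap_getD_eq_flatten]
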